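-- pv_equiv track=rewrite | github.com/MarkSon-42/Team_ALGO | hyungjoon/프로그래머스/레벨 2/230622_프로그래머스_12941_최솟값 만들기/failed.py | solution
-- ===== SOURCE A (Python) =====
-- def solution(A,B):
--     answer = 0
--     n = len(A)
--
--     # 가장 적게나오는 값의 규칙을 보면, 한쪽에선 최솟값, 한쪽에선 최댓값을 찾아 걔네끼리 계산하는게 제일 작은 값이 나옴
--     # 근데 이게 무슨원리로 되는지도 모르겠고; 걍 때려맞춘듯 일단 시초남
--     for i in range(n):
--         aMin = min(A)
--         bMax = max(B)
--         answer += aMin * bMax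
--         del A[A.index(aMin)]
--         del B[B.index(bMax)]
--
--     return answer
-- ===== SOURCE B (Python) =====
-- def solution(A, B):
--     # Return-value equivalent to A (A empties its arguments in place; B does not mutate).
--     return sum(a * b for a, b in zip(sorted(A), sorted(B, reverse=True)))
-- ===== Notes on version B (the rewrite author's own statement) =====
-- stated objective: faster
-- what changed: replaces the n rounds of min/max scans with index-and-delete by one ascending sort of A, one descending sort of B and a single zip dot-product pass
import Mathlib
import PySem

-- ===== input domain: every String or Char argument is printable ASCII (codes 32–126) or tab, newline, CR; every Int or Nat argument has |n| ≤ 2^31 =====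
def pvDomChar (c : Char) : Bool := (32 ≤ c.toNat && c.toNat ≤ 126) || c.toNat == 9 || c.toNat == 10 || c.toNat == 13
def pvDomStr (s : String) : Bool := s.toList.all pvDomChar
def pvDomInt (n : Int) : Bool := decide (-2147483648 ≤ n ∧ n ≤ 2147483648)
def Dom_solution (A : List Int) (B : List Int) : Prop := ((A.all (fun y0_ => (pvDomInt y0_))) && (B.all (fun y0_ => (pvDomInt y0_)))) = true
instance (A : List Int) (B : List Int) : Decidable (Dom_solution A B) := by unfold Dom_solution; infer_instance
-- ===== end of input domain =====

-- B replaces A's n rounds of min/max scans with two sorts and one zip pass (equivalence is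
-- about the RETURN value only: Python A empties its argument lists in place, B does not mutate).

-- ===== PORT A =====
-- one iteration of A's for-loop body (state = (A, B, answer)); .getD 0 marks where
-- Python's min()/max() would raise on an empty list — those inputs are outside Pre_
def pvStepA (st : List Int × List Int × Int) (_i : Int) : List Int × List Int × Int :=
  let a := st.1
  let b := st.2.1
  let aMin := (PySem.List.min? a (fun x => x)).getD 0
  let bMax := (PySem.List.max? b (fun x => x)).getD 0
  let answer := st.2.2 + aMin * bMax
  let a' := match PySem.List.index? a aMin with
            | some i => a.eraseIdx i
            | none => a
  let b' := match PySem.List.index? b bMax with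
            | some i => b.eraseIdx i
            | none => b
  (a', b', answer)

def solution (A : List Int) (B : List Int) : Int :=
  ((PySem.List.pyRange 0 (A.length : Int) 1).foldl pvStepA (A, B, 0)).2.2

-- ===== PORT B =====
def solution_alt (A : List Int) (B : List Int) : Int :=
  (((PySem.List.sorted A (fun x => x)).zip (PySem.List.sorted B (fun x => x) true)).map
    (fun p => p.1 * p.2)).sum

-- ===== PRECONDITION & SPEC =====
-- A raises ValueError (max of an emptied B) exactly when B is shorter than A
def Pre_solution (A : List Int) (B : List Int) : Prop := A.length ≤ B.length
instance (A : List Int) (B : List Int) : Decidable (Pre_solution A B) := by unfold Pre_solution; infer_instance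
def pvWitness_solution : List Int × List Int := ([1, 2], [3, 4])

def Spec_solution (A : List Int) (B : List Int) (out : Int) : Prop := out = solution_alt A B
instance (A : List Int) (B : List Int) (out : Int) : Decidable (Spec_solution A B out) := by unfold Spec_solution; infer_instance

-- ===== CLAIM (what is proved, stated in full; the proofs are below) =====
def Claim_equal_solution : Prop := ∀ (A : List Int) (B : List Int), Dom_solution A B → Pre_solution A B → Spec_solution A B (solution A B)

-- ===== LEMMAS AND PROOFS =====

-- the head of sorted(a) is the value min(a) returns
lemma pv_min_eq_head (a : List Int) (m : Int) (t : List Int)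
    (h : PySem.List.sorted a (fun x => x) = m :: t) :
    PySem.List.min? a (fun x => x) = some m := by
  have hne : a ≠ [] := by
    intro h0
    rw [h0] at h
    simp [(PySem.List.sorted_eq_nil_iff ([] : List Int) (fun x => x) false).2 rfl] at h
  obtain ⟨m', hm'⟩ : ∃ m', PySem.List.min? a (fun x => x) = some m' := by
    cases hmin : PySem.List.min? a (fun x => x) with
    | none => exact absurd ((PySem.List.min?_eq_none_iff _ _).1 hmin) hne
    | some v => exact ⟨v, rfl⟩
  have hmem : m ∈ a := by
    have : m ∈ PySem.List.sorted a (fun x => x) := by rw [h]; exact List.mem_cons_self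
    exact ((PySem.List.sorted_perm a (fun x => x) false).mem_iff).1 this
  have h1 : m' ≤ m := PySem.List.min?_isMin hm' m hmem
  have h2 : m ≤ m' := PySem.List.key_head_sorted_le a (fun x => x) h m' (PySem.List.min?_mem hm')
  rw [hm', le_antisymm h1 h2]

-- the head of sorted(b, reverse=True) is the value max(b) returns
lemma pv_max_eq_head (b : List Int) (M : Int) (s : List Int)
    (h : PySem.List.sorted b (fun x => x) true = M :: s) :
    PySem.List.max? b (fun x => x) = some M := by
  have hne : b ≠ [] := by
    intro h0
    rw [h0] at h
    simp [(PySem.List.sorted_eq_nil_iff ([] : List Int) (fun x => x) true).2 rfl] at h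
  obtain ⟨M', hM'⟩ : ∃ M', PySem.List.max? b (fun x => x) = some M' := by
    cases hmax : PySem.List.max? b (fun x => x) with
    | none => exact absurd ((PySem.List.max?_eq_none_iff _ _).1 hmax) hne
    | some v => exact ⟨v, rfl⟩
  have hmem : M ∈ b := by
    have : M ∈ PySem.List.sorted b (fun x => x) true := by rw [h]; exact List.mem_cons_self
    exact ((PySem.List.sorted_perm b (fun x => x) true).mem_iff).1 this
  have h1 : M' ≤ M := PySem.List.key_head_sorted_rev_ge b (fun x => x) h M' (PySem.List.max?_mem hM')
  have h2 : M ≤ M' := PySem.List.max?_isMax hM' M hmem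
  rw [hM', le_antisymm h2 h1]

-- deleting at list.index(v) is List.erase
lemma pv_del_index (a : List Int) (v : Int) :
    (match PySem.List.index? a v with
     | some i => a.eraseIdx i
     | none => a) = a.erase v := by
  rw [PySem.List.index?_eq_idxOf?, List.erase_eq_eraseIdx]
  cases List.idxOf? v a <;> rfl

-- after erasing the head value of sorted(a), sorting again yields the tail
lemma pv_sorted_erase_asc (a : List Int) (m : Int) (t : List Int)
    (h : PySem.List.sorted a (fun x => x) = m :: t) :
    PySem.List.sorted (a.erase m) (fun x => x) = t := by
  have hperm : a.Perm (m :: t) := by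
    have := PySem.List.sorted_perm a (fun x => x) false
    rw [h] at this
    exact this.symm
  have hperm' : (a.erase m).Perm t := by
    have := hperm.erase m
    rwa [List.erase_cons_head] at this
  have hpw : t.Pairwise (fun x y : Int => x ≤ y) := by
    have := PySem.List.sorted_pairwise a (fun x => x)
    rw [h] at this
    exact (List.pairwise_cons.1 this).2
  exact PySem.List.sorted_id_eq_of_perm_of_pairwise _ _ hperm'.symm hpw

-- after erasing the head value of sorted(b, reverse=True), sorting again yields the tail
lemma pv_sorted_erase_desc (b : List Int) (M : Int) (s : List Int)
    (h : PySem.List.sorted b (fun x => x) true = M :: s) :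
    PySem.List.sorted (b.erase M) (fun x => x) true = s := by
  have hperm : b.Perm (M :: s) := by
    have := PySem.List.sorted_perm b (fun x => x) true
    rw [h] at this
    exact this.symm
  have hperm' : (b.erase M).Perm s := by
    have := hperm.erase M
    rwa [List.erase_cons_head] at this
  have hpw_s : s.Pairwise (fun x y : Int => y ≤ x) := by
    have := PySem.List.sorted_pairwise_rev b (fun x => x)
    rw [h] at this
    exact (List.pairwise_cons.1 this).2
  have hpw_z : (PySem.List.sorted (b.erase M) (fun x => x) true).Pairwise (fun x y : Int => y ≤ x) :=
    PySem.List.sorted_pairwise_rev (b.erase M) (fun x => x)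
  have hpz : (PySem.List.sorted (b.erase M) (fun x => x) true).Perm s :=
    (PySem.List.sorted_perm (b.erase M) (fun x => x) true).trans hperm'
  exact List.Perm.eq_of_pairwise (fun x y _ _ h1 h2 => le_antisymm h2 h1) hpw_z hpw_s hpz

-- loop invariant: running A's loop once per remaining element of a adds the
-- dot product of sorted(a) with sorted(b, reverse=True) to the accumulator
lemma pv_loop (r : List Int) : ∀ (a b : List Int) (acc : Int),
    r.length = a.length → a.length ≤ b.length →
    (r.foldl pvStepA (a, b, acc)).2.2 =
      acc + (((PySem.List.sorted a (fun x => x)).zip (PySem.List.sorted b (fun x => x) true)).map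
        (fun p => p.1 * p.2)).sum := by
  induction r with
  | nil =>
    intro a b acc hlen _
    have ha : a = [] := List.length_eq_zero_iff.1 hlen.symm
    subst ha
    simp [(PySem.List.sorted_eq_nil_iff ([] : List Int) (fun x => x) false).2 rfl]
  | cons x r ih =>
    intro a b acc hlen hab
    obtain ⟨m, t, hA⟩ : ∃ m t, PySem.List.sorted a (fun x => x) = m :: t := by
      cases hs : PySem.List.sorted a (fun x => x) with
      | nil =>
        have : a = [] := (PySem.List.sorted_eq_nil_iff a (fun x => x) false).1 hs
        rw [this] at hlen; simp at hlen
      | cons m t => exact ⟨m, t, rfl⟩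
    obtain ⟨M, s, hB⟩ : ∃ M s, PySem.List.sorted b (fun x => x) true = M :: s := by
      cases hs : PySem.List.sorted b (fun x => x) true with
      | nil =>
        have hb : b = [] := (PySem.List.sorted_eq_nil_iff b (fun x => x) true).1 hs
        rw [hb] at hab
        simp at hab
        rw [hab] at hlen; simp at hlen
      | cons M s => exact ⟨M, s, rfl⟩
    have hma : m ∈ a := by
      have : m ∈ PySem.List.sorted a (fun x => x) := by rw [hA]; exact List.mem_cons_self
      exact ((PySem.List.sorted_perm a (fun x => x) false).mem_iff).1 this
    have hMb : M ∈ b := by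
      have : M ∈ PySem.List.sorted b (fun x => x) true := by rw [hB]; exact List.mem_cons_self
      exact ((PySem.List.sorted_perm b (fun x => x) true).mem_iff).1 this
    have hstep : pvStepA (a, b, acc) x = (a.erase m, b.erase M, acc + m * M) := by
      show (_, _, _) = _
      rw [pv_min_eq_head a m t hA, pv_max_eq_head b M s hB]
      simp only [Option.getD_some]
      rw [pv_del_index a m, pv_del_index b M]
    have hlen_a : (a.erase m).length = r.length := by
      have := List.length_erase_of_mem hma
      simp at hlen
      omega
    have hlen_ab : (a.erase m).length ≤ (b.erase M).length := by
      have h1 := List.length_erase_of_mem hma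
      have h2 := List.length_erase_of_mem hMb
      have : 1 ≤ a.length := List.length_pos_of_mem hma
      omega
    rw [List.foldl_cons, hstep, ih _ _ _ hlen_a.symm hlen_ab,
        pv_sorted_erase_asc a m t hA, pv_sorted_erase_desc b M s hB, hA, hB]
    simp [List.zip_cons_cons]
    ring

-- ===== VERDICT (by name: the statement is the Claim_ definition above) =====
theorem solution_spec : Claim_equal_solution := by
  intro A B _ hPre
  unfold Spec_solution solution solution_alt
  have hlen : (PySem.List.pyRange 0 (A.length : Int) 1).length = A.length := by
    rw [PySem.List.pyRange_zero_natCast]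
    simp
  rw [pv_loop _ A B 0 hlen hPre, zero_add]
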